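-- pv_equiv track=rewrite | github.com/matomatical/simple-search | simple_search/index/build.py | idecompress_with_gaps
-- ===== SOURCE A (Python) =====
-- def idecompress_with_gaps(cbytes):
--     prev_number = 0
--     i = 0
--     while i < len(cbytes):
--         gap, nbytes = vbyte_decode_next(cbytes, i)
--         i += nbytes
--         number = prev_number + gap
--         yield number
--         prev_number = number
--
-- def vbyte_decode_next(stream, start):
--     number = 0
--     nbytes = 0
--
--     # read in the number in 7-bit chunks
--     # until we see the end-of-number bit set
--     next_bits = stream[start]
--     while not (next_bits & 0b1000_0000):
--         number = (number << 7) | next_bits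
--         nbytes += 1
--         next_bits = stream[start + nbytes]
--
--     # read the last byte, without the end-of-number bit
--     number = (number << 7) ^ (next_bits & 0b0111_1111)
--     nbytes += 1
--
--     # and thus, we reconstructed number, using nbytes bytes!
--     return number, nbytes
-- ===== SOURCE B (Python) =====
-- def idecompress_with_gaps(cbytes):
--     # Single flat pass over the bytes (vbyte_decode_next inlined away).
--     prev_number = 0
--     number = 0
--     pending = False
--     for b in cbytes:
--         if b & 0b1000_0000:
--             number = (number << 7) ^ (b & 0b0111_1111)
--             prev_number += number
--             yield prev_number
--             number = 0
--             pending = False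
--         else:
--             number = (number << 7) | b
--             pending = True
--     if pending:
--         raise IndexError('incomplete vbyte number at end of stream')
-- ===== Notes on version B (the rewrite author's own statement) =====
-- stated objective: simpler
-- what changed: Replaces the index-based outer loop with a nested per-number byte-scanning helper by one flat pass over the byte list that threads the partial number and running total directly, raising IndexError after the loop if the stream ends mid-number (where A's out-of-range read raises).
import Mathlib
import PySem

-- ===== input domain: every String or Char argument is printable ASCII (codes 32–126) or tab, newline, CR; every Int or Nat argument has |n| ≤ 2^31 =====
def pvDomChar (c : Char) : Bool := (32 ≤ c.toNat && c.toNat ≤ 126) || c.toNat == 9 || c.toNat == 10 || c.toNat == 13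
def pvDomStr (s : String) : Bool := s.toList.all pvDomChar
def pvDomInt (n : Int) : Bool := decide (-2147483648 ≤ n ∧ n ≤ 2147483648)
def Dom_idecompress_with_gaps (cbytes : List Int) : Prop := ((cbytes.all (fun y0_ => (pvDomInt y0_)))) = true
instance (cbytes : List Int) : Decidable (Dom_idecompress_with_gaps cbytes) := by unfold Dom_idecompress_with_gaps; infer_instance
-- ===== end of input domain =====

-- B inlines A's per-number helper into one flat pass over the bytes (objective: simpler); equivalence is about the
-- yielded sequence as a list, on streams where A returns (Pre_ below excludes truncated streams, where A raises).

-- ===== PORT A =====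
-- inner while-loop of vbyte_decode_next; the fuel argument only makes the loop total
-- (none = IndexError: the read ran past the end of the stream)
def pvVdNext (stream : List Int) (start : Nat) (number : Int) (nbytes : Nat) : Nat → Option (Int × Nat)
  | 0 => none
  | fuel + 1 =>
    match PySem.List.pyGet? stream ((start + nbytes : Nat) : Int) with
    | none => none
    | some nb =>
      if PySem.Int.band nb 128 = 0 then
        pvVdNext stream start (PySem.Int.bor (number <<< 7) nb) (nbytes + 1) fuel
      else some (PySem.Int.bxor (number <<< 7) (PySem.Int.band nb 127), nbytes + 1)

-- outer while-loop of idecompress_with_gaps; fuel only makes the loop total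
def pvAGo (cbytes : List Int) (prev : Int) (i : Nat) : Nat → List Int
  | 0 => []
  | fuel + 1 =>
    if i < cbytes.length then
      match pvVdNext cbytes i 0 0 (cbytes.length + 1) with
      | none => []          -- IndexError (truncated stream): excluded by Pre_
      | some (gap, nbytes) =>
        let number := prev + gap
        number :: pvAGo cbytes number (i + nbytes) fuel
    else []

def idecompress_with_gaps (cbytes : List Int) : List Int := pvAGo cbytes 0 0 cbytes.length

-- ===== PORT B =====
-- B's single for-loop over the bytes; the yields are collected in order.  (On exhaustion with a pending
-- partial number Python B raises IndexError — outside Pre_ — so the port just returns the yields so far.)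
def pvBGo : List Int → Int → Int → List Int
  | [], _, _ => []
  | b :: rest, prev, number =>
    if PySem.Int.band b 128 ≠ 0 then
      let number' := PySem.Int.bxor (number <<< 7) (PySem.Int.band b 127)
      let prev' := prev + number'
      prev' :: pvBGo rest prev' 0
    else
      pvBGo rest prev (PySem.Int.bor (number <<< 7) b)

def idecompress_with_gaps_alt (cbytes : List Int) : List Int := pvBGo cbytes 0 0

-- ===== PRECONDITION & SPEC =====
-- A raises IndexError exactly when the stream is nonempty and its last byte lacks the end-of-number bit
-- (the final number is truncated); Pre_ excludes exactly those streams.  Python B raises IndexError there too.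
def Pre_idecompress_with_gaps (cbytes : List Int) : Prop :=
  cbytes.getLast?.all (fun b => PySem.Int.band b 128 != 0) = true
instance (cbytes : List Int) : Decidable (Pre_idecompress_with_gaps cbytes) := by
  unfold Pre_idecompress_with_gaps; infer_instance

def pvWitness_idecompress_with_gaps : List Int := [3, 129, 200]

def Spec_idecompress_with_gaps (cbytes : List Int) (out : List Int) : Prop := out = idecompress_with_gaps_alt cbytes
instance (cbytes : List Int) (out : List Int) : Decidable (Spec_idecompress_with_gaps cbytes out) := by unfold Spec_idecompress_with_gaps; infer_instance

-- ===== CLAIM (what is proved, stated in full; the proofs are below) =====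
def Claim_equal_idecompress_with_gaps : Prop := ∀ (cbytes : List Int), Dom_idecompress_with_gaps cbytes → Pre_idecompress_with_gaps cbytes → Spec_idecompress_with_gaps cbytes (idecompress_with_gaps cbytes)

-- ===== LEMMAS AND PROOFS =====

-- value of one vbyte chunk: continuation bytes pre (bit 7 clear) folded in, then terminator t
def pvChunk (number : Int) (pre : List Int) (t : Int) : Int :=
  PySem.Int.bxor ((pre.foldl (fun n b => PySem.Int.bor (n <<< 7) b) number) <<< 7) (PySem.Int.band t 127)

lemma pvVdNext_spec (pre : List Int) : ∀ (stream : List Int) (start nbytes : Nat) (number t : Int)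
    (rest : List Int) (fuel : Nat),
    stream.drop (start + nbytes) = pre ++ t :: rest →
    (∀ b ∈ pre, PySem.Int.band b 128 = 0) →
    PySem.Int.band t 128 ≠ 0 →
    pre.length + 1 ≤ fuel →
    pvVdNext stream start number nbytes fuel = some (pvChunk number pre t, nbytes + (pre.length + 1)) := by
  induction pre with
  | nil =>
    intro stream start nbytes number t rest fuel hdrop hpre ht hfuel
    obtain ⟨f, rfl⟩ : ∃ f, fuel = f + 1 := ⟨fuel - 1, by omega⟩
    have hget : stream[start + nbytes]? = some t := by
      have h0 : (List.drop (start + nbytes) stream)[0]? = some t := by simp [hdrop]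
      simpa using h0
    simp only [pvVdNext]
    rw [PySem.List.pyGet?_natCast, hget]
    simp [ht, pvChunk]
  | cons a pre ih =>
    intro stream start nbytes number t rest fuel hdrop hpre ht hfuel
    obtain ⟨f, rfl⟩ : ∃ f, fuel = f + 1 := ⟨fuel - 1, by omega⟩
    have hget : stream[start + nbytes]? = some a := by
      have h0 : (List.drop (start + nbytes) stream)[0]? = some a := by simp [hdrop]
      simpa using h0
    have ha : PySem.Int.band a 128 = 0 := hpre a (by simp)
    have hdrop' : stream.drop (start + (nbytes + 1)) = pre ++ t :: rest := by
      have h1 : stream.drop (start + (nbytes + 1)) = (stream.drop (start + nbytes)).drop 1 := by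
        rw [List.drop_drop]; ring_nf
      rw [h1, hdrop]; simp
    have hrec := ih stream start (nbytes + 1) (PySem.Int.bor (number <<< 7) a) t rest f hdrop'
      (fun b hb => hpre b (by simp [hb])) ht (by simpa using hfuel)
    simp only [pvVdNext]
    rw [PySem.List.pyGet?_natCast, hget]
    simp only [ha, hrec]
    simp only [pvChunk, List.foldl_cons, List.length_cons]
    have hn : nbytes + 1 + (pre.length + 1) = nbytes + (pre.length + 1 + 1) := by omega
    rw [hn]
    simp

lemma pvBGo_chunk (pre : List Int) : ∀ (t : Int) (rest : List Int) (prev number : Int),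
    (∀ b ∈ pre, PySem.Int.band b 128 = 0) →
    PySem.Int.band t 128 ≠ 0 →
    pvBGo (pre ++ t :: rest) prev number =
      (prev + pvChunk number pre t) :: pvBGo rest (prev + pvChunk number pre t) 0 := by
  induction pre with
  | nil =>
    intro t rest prev number hpre ht
    simp [pvBGo, ht, pvChunk]
  | cons a pre ih =>
    intro t rest prev number hpre ht
    have ha : PySem.Int.band a 128 = 0 := hpre a (by simp)
    rw [List.cons_append]
    show (if PySem.Int.band a 128 ≠ 0 then _ else pvBGo (pre ++ t :: rest) prev (PySem.Int.bor (number <<< 7) a)) = _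
    rw [if_neg (by simp [ha])]
    rw [ih t rest prev (PySem.Int.bor (number <<< 7) a) (fun b hb => hpre b (by simp [hb])) ht]
    simp [pvChunk, List.foldl_cons]

-- split a well-terminated nonempty stream at its first end-of-number byte
lemma pv_split (l : List Int) (hne : l ≠ [])
    (hpre : l.getLast?.all (fun b => PySem.Int.band b 128 != 0) = true) :
    ∃ pre t rest, l = pre ++ t :: rest ∧ (∀ b ∈ pre, PySem.Int.band b 128 = 0) ∧
      PySem.Int.band t 128 ≠ 0 ∧
      rest.getLast?.all (fun b => PySem.Int.band b 128 != 0) = true := by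
  set p : Int → Bool := fun b => PySem.Int.band b 128 == 0 with hp
  have hlast : l.getLast? = some (l.getLast hne) := List.getLast?_eq_some_getLast hne
  have hlastp : ¬ p (l.getLast hne) = true := by
    rw [hlast] at hpre; simp [p] at hpre ⊢; exact hpre
  have hdw : l.dropWhile p ≠ [] := by
    intro h
    exact hlastp (List.dropWhile_eq_nil_iff.mp h _ (List.getLast_mem hne))
  obtain ⟨t, rest, hcons⟩ := List.exists_cons_of_ne_nil hdw
  refine ⟨l.takeWhile p, t, rest, ?_, ?_, ?_, ?_⟩
  · rw [← hcons, List.takeWhile_append_dropWhile]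
  · intro b hb
    have := List.mem_takeWhile_imp hb
    simpa [p] using this
  · have hh := List.head?_dropWhile_not p (l := l)
    rw [hcons] at hh
    simp only [List.head?_cons] at hh
    simpa [p] using hh
  · rcases Decidable.em (rest = []) with h | h
    · simp [h]
    · have hl2 : l.getLast? = rest.getLast? := by
        conv_lhs => rw [← List.takeWhile_append_dropWhile (p := p) (l := l), hcons]
        rw [show (List.takeWhile p l ++ t :: rest) = (List.takeWhile p l ++ [t]) ++ rest by simp]
        exact List.getLast?_append_of_ne_nil _ h
      rw [← hl2]; exact hpre

lemma pv_main (fuel : Nat) : ∀ (suffix stream : List Int) (i : Nat) (prev : Int),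
    stream.drop i = suffix →
    suffix.getLast?.all (fun b => PySem.Int.band b 128 != 0) = true →
    suffix.length ≤ fuel →
    pvAGo stream prev i fuel = pvBGo suffix prev 0 := by
  induction fuel with
  | zero =>
    intro suffix stream i prev hdrop hpre hlen
    have hnil : suffix = [] := by cases suffix with
      | nil => rfl
      | cons a l => simp at hlen
    subst hnil
    simp [pvAGo, pvBGo]
  | succ fuel ih =>
    intro suffix stream i prev hdrop hpre hlen
    rcases Decidable.em (suffix = []) with h | h
    · subst h
      have hi : stream.length ≤ i := List.drop_eq_nil_iff.mp hdrop
      simp [pvAGo, pvBGo, Nat.not_lt.mpr hi]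
    · obtain ⟨pre, t, rest, hsplit, hprebits, htbit, hrestpre⟩ := pv_split suffix h hpre
      have hi : i < stream.length := by
        rcases Nat.lt_or_ge i stream.length with h' | h'
        · exact h'
        · exact absurd (by rw [← hdrop]; exact List.drop_eq_nil_iff.mpr h') h
      have hslen : suffix.length ≤ stream.length := by
        rw [← hdrop, List.length_drop]; omega
      have hdrop0 : stream.drop (i + 0) = pre ++ t :: rest := by simpa [hsplit] using hdrop
      have hplen : pre.length + 1 ≤ suffix.length := by
        simp only [hsplit, List.length_append, List.length_cons]; try omega
      have hvd := pvVdNext_spec pre stream i 0 0 t rest (stream.length + 1) hdrop0 hprebits htbit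
        (by omega)
      have hdroprest : stream.drop (i + (pre.length + 1)) = rest := by
        have h1 : stream.drop (i + (pre.length + 1)) = (stream.drop i).drop (pre.length + 1) := by
          rw [List.drop_drop]; try ring_nf
        rw [h1, hdrop, hsplit]
        have h2 : (pre ++ t :: rest).drop (pre.length + 1) = (t :: rest).drop 1 := by
          rw [← List.drop_drop, List.drop_left]
        rw [h2, List.drop_one, List.tail_cons]
      have hrlen : rest.length ≤ fuel := by
        have : suffix.length = pre.length + 1 + rest.length := by
          simp only [hsplit, List.length_append, List.length_cons]; try omega
        omega
      simp only [pvAGo, if_pos hi, hvd, Nat.zero_add]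
      rw [hsplit, pvBGo_chunk pre t rest prev 0 hprebits htbit]
      rw [ih rest stream (i + (pre.length + 1)) (prev + pvChunk 0 pre t) hdroprest hrestpre hrlen]

-- ===== VERDICT (by name: the statement is the Claim_ definition above) =====
theorem idecompress_with_gaps_spec : Claim_equal_idecompress_with_gaps := by
  intro cbytes _ hpre
  unfold Spec_idecompress_with_gaps idecompress_with_gaps idecompress_with_gaps_alt
  exact pv_main cbytes.length cbytes cbytes 0 0 (by simp) hpre (le_refl _)
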